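-- pv_equiv track=rewrite | github.com/newnamelsl/project | text_enroll_md-share_clean/preprocess/500h_with_wenet_drama_sinvxx_1-3s/version_kaldi_ipa/forced_alignment_cut/data_process/cut_datalist_by_timestamp.py | get_segment_timestamp
-- ===== SOURCE A (Python) =====
-- def get_segment_timestamp(datalist_dict, c_timestamp_dict):
--     seg_timestamp_dict = {}
--     for uttid, utt_datalist_dict in datalist_dict.items():
--         if uttid in c_timestamp_dict:
--             c_timestamp = c_timestamp_dict[uttid]
--             segment_label = utt_datalist_dict["segment_label"]
--             seg_len_list = [ len(seg) for seg in segment_label ]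
--             seg_timestamp_list = []
--             i = 0
--             for sl in seg_len_list:
--                 seg_ts = c_timestamp[i:i+sl]
--                 seg_timestamp_list.append(seg_ts)
--                 i += sl
--             seg_timestamp_dict[uttid] = seg_timestamp_list
--     return seg_timestamp_dict
-- ===== SOURCE B (Python) =====
-- def _chop(segments, ts):
--     if not segments:
--         return []
--     n = len(segments[0])
--     return [ts[:n]] + _chop(segments[1:], ts[n:])
--
-- def get_segment_timestamp(datalist_dict, c_timestamp_dict):
--     return {uttid: _chop(utt["segment_label"], c_timestamp_dict[uttid])
--             for uttid, utt in datalist_dict.items()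
--             if uttid in c_timestamp_dict}
-- ===== Notes on version B (the rewrite author's own statement) =====
-- stated objective: idiomatic
-- what changed: Replaces the stateful loop threading a running slice index with a recursive helper that takes the next len(seg) elements and recurses on the dropped remainder, and the outer loop with a dict comprehension.
import Mathlib
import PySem

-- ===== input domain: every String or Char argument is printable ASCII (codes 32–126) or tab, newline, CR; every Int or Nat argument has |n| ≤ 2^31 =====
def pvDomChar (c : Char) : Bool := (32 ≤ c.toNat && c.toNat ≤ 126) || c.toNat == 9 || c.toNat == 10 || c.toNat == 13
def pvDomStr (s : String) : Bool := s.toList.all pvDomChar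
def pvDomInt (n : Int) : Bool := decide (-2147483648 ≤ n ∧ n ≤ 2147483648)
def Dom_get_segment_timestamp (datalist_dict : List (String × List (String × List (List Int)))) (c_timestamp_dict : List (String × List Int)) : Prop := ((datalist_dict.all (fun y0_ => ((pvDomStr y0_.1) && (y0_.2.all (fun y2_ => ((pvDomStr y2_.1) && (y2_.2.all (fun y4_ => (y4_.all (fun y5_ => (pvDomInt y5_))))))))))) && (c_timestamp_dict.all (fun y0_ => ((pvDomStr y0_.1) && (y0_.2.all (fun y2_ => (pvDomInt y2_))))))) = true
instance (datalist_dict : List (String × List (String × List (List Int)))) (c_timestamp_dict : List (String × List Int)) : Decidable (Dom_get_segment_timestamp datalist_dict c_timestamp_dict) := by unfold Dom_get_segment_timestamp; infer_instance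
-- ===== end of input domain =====

-- B replaces A's running-index loop with a recursive take/drop split of the remainder (objective: idiomatic).

-- ===== PORT A =====
-- one step of A's inner `for sl in seg_len_list` loop: state = (seg_timestamp_list, i)
def pvStepA (c_timestamp : List Int) (st : List (List Int) × Int) (sl : Int) : List (List Int) × Int :=
  (st.1 ++ [PySem.List.slice c_timestamp (some st.2) (some (st.2 + sl))], st.2 + sl)

def get_segment_timestamp (datalist_dict : List (String × List (String × List (List Int)))) (c_timestamp_dict : List (String × List Int)) : List (String × List (List Int)) :=
  (datalist_dict.foldl
    (fun (seg_timestamp_dict : PySem.Dict String (List (List Int))) p =>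
      match List.lookup p.1 c_timestamp_dict with
      | none => seg_timestamp_dict
      | some c_timestamp =>
        match List.lookup "segment_label" p.2 with
        | none => seg_timestamp_dict   -- Python raises KeyError here; excluded by Pre_
        | some segment_label =>
          let seg_len_list := segment_label.map (fun seg => (seg.length : Int))
          let r := seg_len_list.foldl (pvStepA c_timestamp) ([], 0)
          seg_timestamp_dict.insert p.1 r.1)
    PySem.Dict.empty).items

-- ===== PORT B =====
-- _chop: ts[:n] / ts[n:] with n = len(segments[0]) ≥ 0, where Python slicing is exactly take/drop
def pvChop : List (List Int) → List Int → List (List Int)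
  | [], _ => []
  | s :: rest, ts => ts.take s.length :: pvChop rest (ts.drop s.length)

def get_segment_timestamp_alt (datalist_dict : List (String × List (String × List (List Int)))) (c_timestamp_dict : List (String × List Int)) : List (String × List (List Int)) :=
  (datalist_dict.foldl
    (fun (d : PySem.Dict String (List (List Int))) p =>
      match List.lookup p.1 c_timestamp_dict with
      | none => d
      | some ts =>
        match List.lookup "segment_label" p.2 with
        | none => d   -- Python raises KeyError here; excluded by Pre_
        | some segs => d.insert p.1 (pvChop segs ts))
    PySem.Dict.empty).items

-- ===== PRECONDITION & SPEC =====
-- Pre_ excludes exactly the inputs on which Python A raises KeyError: an utterance present in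
-- c_timestamp_dict whose datalist entry lacks the "segment_label" key.
def Pre_get_segment_timestamp (datalist_dict : List (String × List (String × List (List Int)))) (c_timestamp_dict : List (String × List Int)) : Prop :=
  ∀ p ∈ datalist_dict, (List.lookup p.1 c_timestamp_dict).isSome →
    (List.lookup "segment_label" p.2).isSome

instance (datalist_dict : List (String × List (String × List (List Int)))) (c_timestamp_dict : List (String × List Int)) : Decidable (Pre_get_segment_timestamp datalist_dict c_timestamp_dict) := by unfold Pre_get_segment_timestamp; infer_instance

def pvWitness_get_segment_timestamp : (List (String × List (String × List (List Int)))) × (List (String × List Int)) :=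
  ([("u", [("segment_label", [[1], [2, 3]])])], [("u", [10, 20, 30])])

def Spec_get_segment_timestamp (datalist_dict : List (String × List (String × List (List Int)))) (c_timestamp_dict : List (String × List Int)) (out : List (String × List (List Int))) : Prop := out = get_segment_timestamp_alt datalist_dict c_timestamp_dict
instance (datalist_dict : List (String × List (String × List (List Int)))) (c_timestamp_dict : List (String × List Int)) (out : List (String × List (List Int))) : Decidable (Spec_get_segment_timestamp datalist_dict c_timestamp_dict out) := by unfold Spec_get_segment_timestamp; infer_instance

-- ===== CLAIM (what is proved, stated in full; the proofs are below) =====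
def Claim_equal_get_segment_timestamp : Prop := ∀ (datalist_dict : List (String × List (String × List (List Int)))) (c_timestamp_dict : List (String × List Int)), Dom_get_segment_timestamp datalist_dict c_timestamp_dict → Pre_get_segment_timestamp datalist_dict c_timestamp_dict → Spec_get_segment_timestamp datalist_dict c_timestamp_dict (get_segment_timestamp datalist_dict c_timestamp_dict)

-- ===== LEMMAS AND PROOFS =====

-- A's index-threading inner loop computes exactly pvChop on the dropped remainder.
lemma foldA_eq_chop (ts : List Int) :
    ∀ (segs : List (List Int)) (k : Nat) (acc : List (List Int)),
      ((segs.map (fun seg => (seg.length : Int))).foldl (pvStepA ts) (acc, (k : Int))).1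
        = acc ++ pvChop segs (ts.drop k) := by
  intro segs
  induction segs with
  | nil => intro k acc; simp [pvChop]
  | cons s rest ih =>
    intro k acc
    have hcast : (k : Int) + (s.length : Int) = ((k + s.length : Nat) : Int) := by push_cast; ring
    simp only [List.map_cons, List.foldl_cons, pvStepA]
    rw [PySem.List.slice_natCast_add, hcast, ih (k + s.length) _]
    simp [pvChop, List.drop_drop]

lemma step_eq (c_timestamp_dict : List (String × List Int)) :
    (fun (seg_timestamp_dict : PySem.Dict String (List (List Int))) (p : String × List (String × List (List Int))) =>
      match List.lookup p.1 c_timestamp_dict with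
      | none => seg_timestamp_dict
      | some c_timestamp =>
        match List.lookup "segment_label" p.2 with
        | none => seg_timestamp_dict
        | some segment_label =>
          let seg_len_list := segment_label.map (fun seg => (seg.length : Int))
          let r := seg_len_list.foldl (pvStepA c_timestamp) ([], 0)
          seg_timestamp_dict.insert p.1 r.1)
    = (fun (d : PySem.Dict String (List (List Int))) (p : String × List (String × List (List Int))) =>
      match List.lookup p.1 c_timestamp_dict with
      | none => d
      | some ts =>
        match List.lookup "segment_label" p.2 with
        | none => d
        | some segs => d.insert p.1 (pvChop segs ts)) := by
  funext d p
  cases h1 : List.lookup p.1 c_timestamp_dict with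
  | none => rfl
  | some ts =>
    cases h2 : List.lookup "segment_label" p.2 with
    | none => rfl
    | some segs =>
      simp only []
      have := foldA_eq_chop ts segs 0 []
      simp only [Nat.cast_zero, List.drop_zero, List.nil_append] at this
      rw [this]

-- ===== VERDICT (by name: the statement is the Claim_ definition above) =====
theorem get_segment_timestamp_spec : Claim_equal_get_segment_timestamp := by
  intro datalist_dict c_timestamp_dict _dom _pre
  unfold Spec_get_segment_timestamp get_segment_timestamp get_segment_timestamp_alt
  rw [step_eq]
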